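-- pv_equiv track=rewrite | github.com/Crunchcow/Spielbetrieb | fctm_core/ui_helpers.py | _anfrage_timeline_html
-- ===== SOURCE A (Python) =====
-- def _anfrage_timeline_html(typ: str, status: str) -> str:
--     """Gibt eine mini HTML-Timeline für den Anfrage-Workflow zurück."""
--     steps = [
--         ("ausstehend",        "⏳", "Ausstehend"),
--         ("dfbnet_ausstehend", "✅", "Genehmigt"),
--         ("abgeschlossen",     "🏁", "Abgeschlossen"),
--     ]
--     if status == "abgelehnt":
--         steps = [
--             ("ausstehend", "⏳", "Ausstehend"),
--             ("abgelehnt",  "❌", "Abgelehnt"),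
--         ]
--     elif typ == "allgemein":
--         steps = [
--             ("ausstehend",    "⏳", "Ausstehend"),
--             ("abgeschlossen", "✅", "Beantwortet"),
--         ]
--
--     items = []
--     reached = False
--     for s_key, s_icon, s_label in steps:
--         if s_key == status:
--             reached = True
--             color, fw = "#c00000", "bold"
--         elif not reached:
--             color, fw = "#22c55e", "normal"
--         else:
--             color, fw = "#cccccc", "normal"
--         items.append(
--             f'<span style="color:{color};font-weight:{fw};font-size:11px;'
--             f'white-space:nowrap;">{s_icon} {s_label}</span>'
--         )
--     arrow = '<span style="color:#cccccc;font-size:11px;"> → </span>'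
--     return (
--         f'<div style="margin-top:6px;padding:4px 0;">'
--         + arrow.join(items)
--         + '</div>'
--     )
-- ===== SOURCE B (Python) =====
-- GREEN, RED, GRAY = "#22c55e", "#c00000", "#cccccc"
-- ARROW = '<span style="color:#cccccc;font-size:11px;"> → </span>'
--
--
-- def _span(color, fw, icon, label):
--     return (
--         f'<span style="color:{color};font-weight:{fw};font-size:11px;'
--         f'white-space:nowrap;">{icon} {label}</span>'
--     )
--
--
-- def _div(*cells):
--     return '<div style="margin-top:6px;padding:4px 0;">' + ARROW.join(cells) + '</div>'
--
--
-- # The status keys are fixed, so every possible timeline is precomputed once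
-- # and each call is a plain table lookup.
-- _TL_ABGELEHNT = _div(_span(GREEN, "normal", "⏳", "Ausstehend"),
--                      _span(RED, "bold", "❌", "Abgelehnt"))
--
-- _TL_ALLGEMEIN = {
--     "ausstehend":    _div(_span(RED, "bold", "⏳", "Ausstehend"),
--                           _span(GRAY, "normal", "✅", "Beantwortet")),
--     "abgeschlossen": _div(_span(GREEN, "normal", "⏳", "Ausstehend"),
--                           _span(RED, "bold", "✅", "Beantwortet")),
-- }
-- _TL_ALLGEMEIN_DEFAULT = _div(_span(GREEN, "normal", "⏳", "Ausstehend"),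
--                              _span(GREEN, "normal", "✅", "Beantwortet"))
--
-- _TL_STANDARD = {
--     "ausstehend":        _div(_span(RED, "bold", "⏳", "Ausstehend"),
--                               _span(GRAY, "normal", "✅", "Genehmigt"),
--                               _span(GRAY, "normal", "🏁", "Abgeschlossen")),
--     "dfbnet_ausstehend": _div(_span(GREEN, "normal", "⏳", "Ausstehend"),
--                               _span(RED, "bold", "✅", "Genehmigt"),
--                               _span(GRAY, "normal", "🏁", "Abgeschlossen")),
--     "abgeschlossen":     _div(_span(GREEN, "normal", "⏳", "Ausstehend"),
--                               _span(GREEN, "normal", "✅", "Genehmigt"),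
--                               _span(RED, "bold", "🏁", "Abgeschlossen")),
-- }
-- _TL_STANDARD_DEFAULT = _div(_span(GREEN, "normal", "⏳", "Ausstehend"),
--                             _span(GREEN, "normal", "✅", "Genehmigt"),
--                             _span(GREEN, "normal", "🏁", "Abgeschlossen"))
--
--
-- def _anfrage_timeline_html(typ: str, status: str) -> str:
--     """Gibt eine mini HTML-Timeline für den Anfrage-Workflow zurück."""
--     if status == "abgelehnt":
--         return _TL_ABGELEHNT
--     if typ == "allgemein":
--         return _TL_ALLGEMEIN.get(status, _TL_ALLGEMEIN_DEFAULT)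
--     return _TL_STANDARD.get(status, _TL_STANDARD_DEFAULT)
-- ===== Notes on version B (the rewrite author's own statement) =====
-- stated objective: alternative
-- what changed: Since the step keys are a fixed finite set, B precomputes every possible timeline string once at module load and replaces A's per-call flag-threading render loop with a constant-time dispatch into two small lookup tables (plus a default per variant).
import Mathlib
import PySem

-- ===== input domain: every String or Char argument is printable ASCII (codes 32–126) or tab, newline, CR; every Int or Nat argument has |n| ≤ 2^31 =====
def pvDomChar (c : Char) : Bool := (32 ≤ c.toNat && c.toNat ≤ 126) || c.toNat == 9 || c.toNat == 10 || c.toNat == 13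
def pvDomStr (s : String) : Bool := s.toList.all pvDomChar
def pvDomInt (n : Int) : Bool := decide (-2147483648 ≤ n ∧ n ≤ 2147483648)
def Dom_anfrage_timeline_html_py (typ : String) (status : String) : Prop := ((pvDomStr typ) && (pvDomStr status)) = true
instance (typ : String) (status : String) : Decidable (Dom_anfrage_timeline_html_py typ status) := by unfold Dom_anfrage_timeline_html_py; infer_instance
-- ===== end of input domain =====

-- B replaces A's per-call render loop by precomputed timeline strings and a
-- constant-time table dispatch (objective: alternative decomposition).

-- ===== PORT A =====
-- steps selection (the three branches of A, in order)
def pvStepsA (typ status : String) : List (String × String × String) :=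
  if status == "abgelehnt" then
    [("ausstehend", "⏳", "Ausstehend"), ("abgelehnt", "❌", "Abgelehnt")]
  else if typ == "allgemein" then
    [("ausstehend", "⏳", "Ausstehend"), ("abgeschlossen", "✅", "Beantwortet")]
  else
    [("ausstehend", "⏳", "Ausstehend"), ("dfbnet_ausstehend", "✅", "Genehmigt"),
     ("abgeschlossen", "🏁", "Abgeschlossen")]

-- the f-string building one span
def pvSpanA (color fw icon label : String) : String :=
  "<span style=\"color:" ++ color ++ ";font-weight:" ++ fw ++
    ";font-size:11px;white-space:nowrap;\">" ++ icon ++ " " ++ label ++ "</span>"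

-- A's loop: threads the 'reached' flag and the accumulated items
def pvLoopA (status : String) : List (String × String × String) → Bool → List String → List String
  | [], _, items => items
  | (k, icon, label) :: rest, reached, items =>
    if k == status then
      pvLoopA status rest true (items ++ [pvSpanA "#c00000" "bold" icon label])
    else if !reached then
      pvLoopA status rest reached (items ++ [pvSpanA "#22c55e" "normal" icon label])
    else
      pvLoopA status rest reached (items ++ [pvSpanA "#cccccc" "normal" icon label])

def anfrage_timeline_html_py (typ : String) (status : String) : String :=
  "<div style=\"margin-top:6px;padding:4px 0;\">" ++
    String.intercalate "<span style=\"color:#cccccc;font-size:11px;\"> → </span>"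
      (pvLoopA status (pvStepsA typ status) false []) ++ "</div>"

-- ===== PORT B =====
-- module-level helpers of Source B
def pvSpanB (color fw icon label : String) : String :=
  "<span style=\"color:" ++ color ++ ";font-weight:" ++ fw ++
    ";font-size:11px;white-space:nowrap;\">" ++ icon ++ " " ++ label ++ "</span>"

def pvDivB (cells : List String) : String :=
  "<div style=\"margin-top:6px;padding:4px 0;\">" ++
    String.intercalate "<span style=\"color:#cccccc;font-size:11px;\"> → </span>" cells ++ "</div>"

-- the precomputed timeline table of Source B
def pvTlAbgelehnt : String :=
  pvDivB [pvSpanB "#22c55e" "normal" "⏳" "Ausstehend", pvSpanB "#c00000" "bold" "❌" "Abgelehnt"]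

def pvTlAllgemein : PySem.Dict String String :=
  PySem.Dict.ofList
    [("ausstehend", pvDivB [pvSpanB "#c00000" "bold" "⏳" "Ausstehend",
                            pvSpanB "#cccccc" "normal" "✅" "Beantwortet"]),
     ("abgeschlossen", pvDivB [pvSpanB "#22c55e" "normal" "⏳" "Ausstehend",
                               pvSpanB "#c00000" "bold" "✅" "Beantwortet"])]

def pvTlAllgemeinDefault : String :=
  pvDivB [pvSpanB "#22c55e" "normal" "⏳" "Ausstehend", pvSpanB "#22c55e" "normal" "✅" "Beantwortet"]

def pvTlStandard : PySem.Dict String String :=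
  PySem.Dict.ofList
    [("ausstehend", pvDivB [pvSpanB "#c00000" "bold" "⏳" "Ausstehend",
                            pvSpanB "#cccccc" "normal" "✅" "Genehmigt",
                            pvSpanB "#cccccc" "normal" "🏁" "Abgeschlossen"]),
     ("dfbnet_ausstehend", pvDivB [pvSpanB "#22c55e" "normal" "⏳" "Ausstehend",
                                   pvSpanB "#c00000" "bold" "✅" "Genehmigt",
                                   pvSpanB "#cccccc" "normal" "🏁" "Abgeschlossen"]),
     ("abgeschlossen", pvDivB [pvSpanB "#22c55e" "normal" "⏳" "Ausstehend",
                               pvSpanB "#22c55e" "normal" "✅" "Genehmigt",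
                               pvSpanB "#c00000" "bold" "🏁" "Abgeschlossen"])]

def pvTlStandardDefault : String :=
  pvDivB [pvSpanB "#22c55e" "normal" "⏳" "Ausstehend",
          pvSpanB "#22c55e" "normal" "✅" "Genehmigt",
          pvSpanB "#22c55e" "normal" "🏁" "Abgeschlossen"]

def anfrage_timeline_html_py_alt (typ : String) (status : String) : String :=
  if status == "abgelehnt" then pvTlAbgelehnt
  else if typ == "allgemein" then PySem.Dict.getD pvTlAllgemein status pvTlAllgemeinDefault
  else PySem.Dict.getD pvTlStandard status pvTlStandardDefault

-- ===== PRECONDITION & SPEC =====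
def Spec_anfrage_timeline_html_py (typ : String) (status : String) (out : String) : Prop := out = anfrage_timeline_html_py_alt typ status
instance (typ : String) (status : String) (out : String) : Decidable (Spec_anfrage_timeline_html_py typ status out) := by unfold Spec_anfrage_timeline_html_py; infer_instance

-- ===== CLAIM (what is proved, stated in full; the proofs are below) =====
def Claim_equal_anfrage_timeline_html_py : Prop := ∀ (typ : String) (status : String), Dom_anfrage_timeline_html_py typ status → Spec_anfrage_timeline_html_py typ status (anfrage_timeline_html_py typ status)

-- ===== LEMMAS AND PROOFS =====
-- the two literal dicts, in Dict.mk form (ofList over literal distinct keys computes)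
theorem pvTlAllgemein_mk : pvTlAllgemein = PySem.Dict.mk
    [("ausstehend", pvDivB [pvSpanB "#c00000" "bold" "⏳" "Ausstehend",
                            pvSpanB "#cccccc" "normal" "✅" "Beantwortet"]),
     ("abgeschlossen", pvDivB [pvSpanB "#22c55e" "normal" "⏳" "Ausstehend",
                               pvSpanB "#c00000" "bold" "✅" "Beantwortet"])] := by rfl

theorem pvTlStandard_mk : pvTlStandard = PySem.Dict.mk
    [("ausstehend", pvDivB [pvSpanB "#c00000" "bold" "⏳" "Ausstehend",
                            pvSpanB "#cccccc" "normal" "✅" "Genehmigt",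
                            pvSpanB "#cccccc" "normal" "🏁" "Abgeschlossen"]),
     ("dfbnet_ausstehend", pvDivB [pvSpanB "#22c55e" "normal" "⏳" "Ausstehend",
                                   pvSpanB "#c00000" "bold" "✅" "Genehmigt",
                                   pvSpanB "#cccccc" "normal" "🏁" "Abgeschlossen"]),
     ("abgeschlossen", pvDivB [pvSpanB "#22c55e" "normal" "⏳" "Ausstehend",
                               pvSpanB "#22c55e" "normal" "✅" "Genehmigt",
                               pvSpanB "#c00000" "bold" "🏁" "Abgeschlossen"])] := by rfl

theorem pv_main (typ status : String) :
    anfrage_timeline_html_py typ status = anfrage_timeline_html_py_alt typ status := by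
  by_cases h1 : status = "abgelehnt"
  · subst h1; rfl
  · by_cases h2 : typ = "allgemein"
    · subst h2
      by_cases h3 : status = "ausstehend"
      · subst h3; rfl
      · by_cases h4 : status = "abgeschlossen"
        · subst h4; rfl
        · simp [anfrage_timeline_html_py, anfrage_timeline_html_py_alt, pvStepsA, pvLoopA,
            pvTlAllgemein_mk, PySem.Dict.getD_eq_get?_getD, PySem.Dict.get?,
            pvSpanA, pvSpanB, pvDivB, h1, Ne.symm h3, Ne.symm h4, pvTlAllgemeinDefault]
    · by_cases h3 : status = "ausstehend"
      · subst h3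
        simp [anfrage_timeline_html_py, anfrage_timeline_html_py_alt, pvStepsA, pvLoopA,
          pvTlStandard_mk, PySem.Dict.getD_eq_get?_getD, PySem.Dict.get?,
          pvSpanA, pvSpanB, pvDivB, h2]
      · by_cases h4 : status = "dfbnet_ausstehend"
        · subst h4
          simp [anfrage_timeline_html_py, anfrage_timeline_html_py_alt, pvStepsA, pvLoopA,
            pvTlStandard_mk, PySem.Dict.getD_eq_get?_getD, PySem.Dict.get?,
            pvSpanA, pvSpanB, pvDivB, h2]
        · by_cases h5 : status = "abgeschlossen"
          · subst h5
            simp [anfrage_timeline_html_py, anfrage_timeline_html_py_alt, pvStepsA, pvLoopA,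
              pvTlStandard_mk, PySem.Dict.getD_eq_get?_getD, PySem.Dict.get?,
              pvSpanA, pvSpanB, pvDivB, h2]
          · simp [anfrage_timeline_html_py, anfrage_timeline_html_py_alt, pvStepsA, pvLoopA,
              pvTlStandard_mk, PySem.Dict.getD_eq_get?_getD, PySem.Dict.get?,
              pvSpanA, pvSpanB, pvDivB, pvTlStandardDefault,
              h1, h2, Ne.symm h3, Ne.symm h4, Ne.symm h5]

-- ===== VERDICT (by name: the statement is the Claim_ definition above) =====
theorem anfrage_timeline_html_py_spec : Claim_equal_anfrage_timeline_html_py := by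
  intro typ status _
  exact pv_main typ status
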